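-- pv_equiv track=rewrite | github.com/paa1981/130417 | new_test.py | age_workers
-- ===== SOURCE A (Python) =====
-- def age_workers(workers_list):
--     from21to30 =[]
--     from31to40 = []
--     from41to50 = []
--     for worker in workers_list:
--         if worker['age'] <= 30:
--             from21to30.append(worker)
--         elif worker['age'] <=40:
--             from31to40.append(worker)
--         else:
--             from41to50.append(worker)
--     return from21to30, from31to40, from41to50
-- ===== SOURCE B (Python) =====
-- def age_workers(workers_list):
--     from21to30 = [w for w in workers_list if w['age'] <= 30]
--     from31to40 = [w for w in workers_list if 30 < w['age'] <= 40]
--     from41to50 = [w for w in workers_list if w['age'] > 40]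
--     return from21to30, from31to40, from41to50
-- ===== Notes on version B (the rewrite author's own statement) =====
-- stated objective: idiomatic
-- what changed: Replaces the single pass with branch dispatch by three independent full-scan list comprehensions, one per age bucket.
import Mathlib
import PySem

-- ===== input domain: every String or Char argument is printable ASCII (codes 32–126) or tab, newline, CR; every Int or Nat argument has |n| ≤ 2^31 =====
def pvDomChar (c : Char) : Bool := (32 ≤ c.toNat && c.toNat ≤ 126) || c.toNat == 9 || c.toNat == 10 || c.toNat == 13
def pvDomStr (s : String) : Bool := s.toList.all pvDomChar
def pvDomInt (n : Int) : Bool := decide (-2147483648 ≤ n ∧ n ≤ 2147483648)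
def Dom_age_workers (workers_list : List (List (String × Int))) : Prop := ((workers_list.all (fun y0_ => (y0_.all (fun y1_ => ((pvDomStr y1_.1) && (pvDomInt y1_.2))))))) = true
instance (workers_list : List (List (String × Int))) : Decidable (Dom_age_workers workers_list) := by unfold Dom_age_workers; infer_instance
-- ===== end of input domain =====

-- B replaces A's single bucketing loop by three independent full-scan list comprehensions (idiomatic; same O(n) cost).


-- worker['age']: first-match association-list lookup; under Pre_ the key is present, so the
-- default 0 is unreachable (Python raises KeyError exactly when Pre_ fails).
def ageOf (w : List (String × Int)) : Int :=
  ((w.find? (fun p => p.1 == "age")).map Prod.snd).getD 0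

-- ===== PORT A =====
def age_workers (workers_list : List (List (String × Int))) : (List (List (String × Int))) × (List (List (String × Int))) × (List (List (String × Int))) :=
  workers_list.foldl
    (fun acc worker =>
      if ageOf worker ≤ 30 then (acc.1 ++ [worker], acc.2.1, acc.2.2)
      else if ageOf worker ≤ 40 then (acc.1, acc.2.1 ++ [worker], acc.2.2)
      else (acc.1, acc.2.1, acc.2.2 ++ [worker]))
    ([], [], [])

-- ===== PORT B =====
def age_workers_alt (workers_list : List (List (String × Int))) : (List (List (String × Int))) × (List (List (String × Int))) × (List (List (String × Int))) :=
  (workers_list.filter (fun w => ageOf w ≤ 30),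
   workers_list.filter (fun w => 30 < ageOf w ∧ ageOf w ≤ 40),
   workers_list.filter (fun w => 40 < ageOf w))

-- ===== PRECONDITION & SPEC =====
-- Pre_: every worker dict has an 'age' key; otherwise the Python A raises KeyError.
def Pre_age_workers (workers_list : List (List (String × Int))) : Prop :=
  ∀ w ∈ workers_list, (w.find? (fun p => p.1 == "age")).isSome = true
instance (workers_list : List (List (String × Int))) : Decidable (Pre_age_workers workers_list) := by unfold Pre_age_workers; infer_instance
def pvWitness_age_workers : (List (List (String × Int))) := [[("age", 25)], [("age", 35)], [("age", 45)]]
def Spec_age_workers (workers_list : List (List (String × Int))) (out : (List (List (String × Int))) × (List (List (String × Int))) × (List (List (String × Int)))) : Prop := out = age_workers_alt workers_list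
instance (workers_list : List (List (String × Int))) (out : (List (List (String × Int))) × (List (List (String × Int))) × (List (List (String × Int)))) : Decidable (Spec_age_workers workers_list out) := by unfold Spec_age_workers; infer_instance

-- ===== CLAIM (what is proved, stated in full; the proofs are below) =====
def Claim_equal_age_workers : Prop := ∀ (workers_list : List (List (String × Int))), Dom_age_workers workers_list → Pre_age_workers workers_list → Spec_age_workers workers_list (age_workers workers_list)

-- ===== LEMMAS AND PROOFS =====
theorem age_workers_fold (ws : List (List (String × Int)))
    (a b c : List (List (String × Int))) :
    ws.foldl
      (fun acc worker =>
        if ageOf worker ≤ 30 then (acc.1 ++ [worker], acc.2.1, acc.2.2)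
        else if ageOf worker ≤ 40 then (acc.1, acc.2.1 ++ [worker], acc.2.2)
        else (acc.1, acc.2.1, acc.2.2 ++ [worker]))
      (a, b, c)
    = (a ++ ws.filter (fun w => ageOf w ≤ 30),
       b ++ ws.filter (fun w => 30 < ageOf w ∧ ageOf w ≤ 40),
       c ++ ws.filter (fun w => 40 < ageOf w)) := by
  induction ws generalizing a b c with
  | nil => simp
  | cons w ws ih =>
    simp only [List.foldl_cons, List.filter_cons]
    by_cases h1 : ageOf w ≤ 30
    · simp [h1, ih, show ¬(30 < ageOf w ∧ ageOf w ≤ 40) by omega,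
        show ¬(40 < ageOf w) by omega]
    · by_cases h2 : ageOf w ≤ 40
      · simp [h1, h2, ih, show (30 < ageOf w ∧ ageOf w ≤ 40) by omega,
          show ¬(40 < ageOf w) by omega]
      · simp [h1, h2, ih, show (40 < ageOf w) by omega]

-- ===== VERDICT (by name: the statement is the Claim_ definition above) =====
theorem age_workers_spec : Claim_equal_age_workers := by
  intro ws _ _
  unfold Spec_age_workers age_workers age_workers_alt
  simpa using age_workers_fold ws [] [] []
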